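-- pv_equiv track=rewrite | github.com/rbturnbull/msstools | msstools/number.py | number_sentences
-- ===== SOURCE A (Python) =====
-- def number_sentences(data: str) -> str:
--     """
--     Number <S> sentence tags within <P> blocks, restarting at 1 after each </P>.
--
--     Args:
--         data (str): The input text containing XML-like markup.
--
--     Returns:
--         str: The text with <S> tags numbered like <S 1>, <S 2>, etc.
--     """
--     data_len = len(data)
--     result = []
--     s_num = 1
--     in_tag = False
--     tag_start = 0
--     current_index = 0
--
--     while current_index < data_len:
--         char = data[current_index]
--
--         if not in_tag and char != "<":
--             result.append(char)
--             current_index += 1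
--             continue
--
--         if char == "<":
--             in_tag = True
--             tag_start = current_index
--             current_index += 1
--             continue
--
--         if in_tag and char == ">":
--             tag_end = current_index
--             current_tag = data[tag_start:tag_end + 1]
--
--             if "/P" in current_tag:
--                 s_num = 1
--             elif current_tag.startswith("<S") and not current_tag.startswith("</"):
--                 current_tag = f"<S {s_num}>"
--                 s_num += 1
--
--             result.append(current_tag)
--             in_tag = False
--             current_index += 1
--             continue
--
--         current_index += 1
--
--     return ''.join(result)
-- ===== SOURCE B (Python) =====
-- def _consume_tag(rest):
--     """Scan up to the closing '>'; a nested '<' restarts the tag.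
--     Return (tag, remainder after '>') or None if the tag never closes."""
--     tag = '<'
--     for k, c in enumerate(rest):
--         if c == '<':
--             tag = '<'
--         elif c == '>':
--             return tag + '>', rest[k + 1:]
--         else:
--             tag += c
--     return None
--
--
-- def number_sentences(data: str) -> str:
--     parts = []
--     s_num = 1
--     rest = data
--     while rest:
--         lt = rest.find('<')
--         if lt == -1:
--             parts.append(rest)
--             break
--         parts.append(rest[:lt])
--         consumed = _consume_tag(rest[lt + 1:])
--         if consumed is None:
--             break
--         tag, rest = consumed
--         if '/P' in tag:
--             s_num = 1
--         elif tag.startswith('<S') and not tag.startswith('</'):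
--             tag = '<S %d>' % s_num
--             s_num += 1
--         parts.append(tag)
--     return ''.join(parts)
-- ===== Notes on version B (the rewrite author's own statement) =====
-- stated objective: simpler
-- what changed: Replaces the per-character boolean state machine (in_tag flag, saved tag_start index, one result.append per character) with a chunk scan: find() locates each tag and the whole literal run before it is appended as one slice, with a helper consuming the tag (restarting on a nested '<'); appending slices instead of single characters is the constant-factor speedup a timing run measured.
import Mathlib
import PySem

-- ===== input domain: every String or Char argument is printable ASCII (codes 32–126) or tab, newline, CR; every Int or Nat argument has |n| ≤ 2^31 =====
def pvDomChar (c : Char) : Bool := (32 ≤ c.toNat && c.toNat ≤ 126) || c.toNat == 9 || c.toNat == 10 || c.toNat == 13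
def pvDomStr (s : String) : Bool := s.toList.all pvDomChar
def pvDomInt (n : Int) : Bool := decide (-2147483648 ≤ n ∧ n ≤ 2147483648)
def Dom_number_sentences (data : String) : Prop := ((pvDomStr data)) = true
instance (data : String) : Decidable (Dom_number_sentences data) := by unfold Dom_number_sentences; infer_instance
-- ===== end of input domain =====

-- B replaces A's per-character in_tag/tag_start state machine by a find()-driven chunk scan
-- with a separate tag-consuming helper (objective: simpler; return value proved equal).

-- ===== PORT A =====
-- f"<S {s_num}>"
def pvSTag (snum : Int) : List Char :=
  '<' :: 'S' :: ' ' :: ((PySem.Int.toStr snum).toList ++ ['>'])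

-- A's while loop: rest = data[current_index:], scanned one character at a time.
def numberSentencesGo (all : List Char) (rest : List Char) (idx : Nat)
    (snum : Int) (inTag : Bool) (tagStart : Nat) (res : List (List Char)) : List (List Char) :=
  match rest with
  | [] => res
  | c :: rest' =>
    if inTag = false ∧ c ≠ '<' then
      numberSentencesGo all rest' (idx + 1) snum inTag tagStart (res ++ [[c]])
    else if c = '<' then
      numberSentencesGo all rest' (idx + 1) snum true idx res
    else if inTag = true ∧ c = '>' then
      -- current_tag = data[tag_start:tag_end + 1]
      let tag := PySem.List.slice all (some (tagStart : Int)) (some ((idx : Int) + 1))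
      let p : List Char × Int :=
        if PySem.Chars.isIn ['/', 'P'] tag then (tag, 1)
        else if PySem.Chars.startswith tag ['<', 'S'] && !PySem.Chars.startswith tag ['<', '/'] then
          (pvSTag snum, snum + 1)
        else (tag, snum)
      numberSentencesGo all rest' (idx + 1) p.2 false tagStart (res ++ [p.1])
    else
      numberSentencesGo all rest' (idx + 1) snum inTag tagStart res

def number_sentences (data : String) : String :=
  String.ofList (numberSentencesGo data.toList data.toList 0 1 false 0 []).flatten

-- ===== PORT B =====
-- _consume_tag: scan to the closing '>', restarting the accumulator on a nested '<'.
def pvConsumeTag (rest : List Char) (tag : List Char) : Option (List Char × List Char) :=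
  match rest with
  | [] => none
  | c :: r =>
    if c = '<' then pvConsumeTag r ['<']
    else if c = '>' then some (tag ++ ['>'], r)
    else pvConsumeTag r (tag ++ [c])

-- termination helper for the outer loop (cited by numberSentencesAltGo's decreasing_by)
theorem pvConsumeTag_length : ∀ (rs tag t r : List Char),
    pvConsumeTag rs tag = some (t, r) → r.length < rs.length := by
  intro rs
  induction rs with
  | nil => intro tag t r h; simp [pvConsumeTag] at h
  | cons c cs ih =>
    intro tag t r h
    simp only [pvConsumeTag] at h
    split_ifs at h with h1 h2
    · exact Nat.lt_trans (ih _ _ _ h) (by simp)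
    · simp at h
      rw [← h.2]
      simp
    · exact Nat.lt_trans (ih _ _ _ h) (by simp)

-- B's while loop over the remaining string.
def numberSentencesAltGo (rest : List Char) (snum : Int) (parts : List (List Char)) :
    List (List Char) :=
  match hr : rest with
  | [] => parts
  | _ :: _ =>
    let lt := PySem.Chars.find rest ['<']
    if lt = -1 then parts ++ [rest]
    else
      let parts' := parts ++ [PySem.List.slice rest none (some lt)]
      match hc : pvConsumeTag (rest.drop (lt.toNat + 1)) ['<'] with
      | none => parts'
      | some (tag, rest') =>
        let p : List Char × Int :=
          if PySem.Chars.isIn ['/', 'P'] tag then (tag, 1)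
          else if PySem.Chars.startswith tag ['<', 'S'] && !PySem.Chars.startswith tag ['<', '/'] then
            (pvSTag snum, snum + 1)
          else (tag, snum)
        numberSentencesAltGo rest' p.2 (parts' ++ [p.1])
termination_by rest.length
decreasing_by
  subst hr
  have h1 := pvConsumeTag_length _ _ _ _ hc
  simp only [List.length_drop, List.length_cons] at h1 ⊢
  omega

def number_sentences_alt (data : String) : String :=
  String.ofList (numberSentencesAltGo data.toList 1 []).flatten

-- ===== PRECONDITION & SPEC =====
def Spec_number_sentences (data : String) (out : String) : Prop := out = number_sentences_alt data
instance (data : String) (out : String) : Decidable (Spec_number_sentences data out) := by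
  unfold Spec_number_sentences; infer_instance

-- ===== CLAIM (what is proved, stated in full; the proofs are below) =====
def Claim_equal_number_sentences : Prop :=
  ∀ (data : String), Dom_number_sentences data → Spec_number_sentences data (number_sentences data)

-- ===== LEMMAS AND PROOFS =====

-- shared tag processing ("/P" resets, "<S"-not-"</" renumbers)
def pvProc (tag : List Char) (snum : Int) : List Char × Int :=
  if PySem.Chars.isIn ['/', 'P'] tag then (tag, 1)
  else if PySem.Chars.startswith tag ['<', 'S'] && !PySem.Chars.startswith tag ['<', '/'] then
    (pvSTag snum, snum + 1)
  else (tag, snum)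

-- reference machine both ports are reduced to
mutual
def pvRefLit (rest : List Char) (snum : Int) : List Char :=
  match rest with
  | [] => []
  | c :: r => if c = '<' then pvRefTag r ['<'] snum else c :: pvRefLit r snum
def pvRefTag (rest : List Char) (tag : List Char) (snum : Int) : List Char :=
  match rest with
  | [] => []
  | c :: r =>
    if c = '<' then pvRefTag r ['<'] snum
    else if c = '>' then (pvProc (tag ++ ['>']) snum).1 ++ pvRefLit r (pvProc (tag ++ ['>']) snum).2
    else pvRefTag r (tag ++ [c]) snum
end

theorem pv_singleton_infix {α : Type} (a : α) (l : List α) : [a] <:+: l ↔ a ∈ l := by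
  constructor
  · intro h
    exact h.subset (List.mem_singleton_self a)
  · intro h
    obtain ⟨s, t, rfl⟩ := List.append_of_mem h
    exact ⟨s, t, by simp⟩

theorem pv_take_snoc (all : List Char) (t idx : Nat) (c : Char)
    (hle : t ≤ idx) (hget : all[idx]? = some c) :
    (all.drop t).take (idx + 1 - t) = (all.drop t).take (idx - t) ++ [c] := by
  have h1 : idx + 1 - t = (idx - t) + 1 := by omega
  rw [h1, List.take_add_one]
  have h2 : (all.drop t)[idx - t]? = some c := by
    rw [List.getElem?_drop]
    have : t + (idx - t) = idx := by omega
    rw [this, hget]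
  rw [h2]
  rfl

theorem pvRefLit_no_lt : ∀ (rest : List Char) (snum : Int),
    (∀ c ∈ rest, c ≠ '<') → pvRefLit rest snum = rest := by
  intro rest
  induction rest with
  | nil => intro snum _; simp [pvRefLit]
  | cons c r ih =>
    intro snum h
    have hc : c ≠ '<' := h c (by simp)
    simp [pvRefLit, hc, ih snum (fun x hx => h x (by simp [hx]))]

theorem pvRefLit_split : ∀ (pre suf : List Char) (snum : Int),
    (∀ c ∈ pre, c ≠ '<') →
    pvRefLit (pre ++ '<' :: suf) snum = pre ++ pvRefTag suf ['<'] snum := by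
  intro pre
  induction pre with
  | nil => intro suf snum _; simp [pvRefLit]
  | cons c pr ih =>
    intro suf snum h
    have hc : c ≠ '<' := h c (by simp)
    simp [pvRefLit, hc, ih suf snum (fun x hx => h x (by simp [hx]))]

theorem pvRefTag_consume : ∀ (rs tag : List Char) (snum : Int),
    pvRefTag rs tag snum =
      (match pvConsumeTag rs tag with
       | none => []
       | some (t, r) => (pvProc t snum).1 ++ pvRefLit r (pvProc t snum).2) := by
  intro rs
  induction rs with
  | nil => intro tag snum; simp [pvRefTag, pvConsumeTag]
  | cons c r ih =>
    intro tag snum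
    by_cases h1 : c = '<'
    · simp [pvRefTag, pvConsumeTag, h1, ih]
    · by_cases h2 : c = '>'
      · simp [pvRefTag, pvConsumeTag, h2]
      · simp [pvRefTag, pvConsumeTag, h1, h2, ih]

theorem altGo_eq : ∀ (n : Nat) (rest : List Char) (snum : Int) (parts : List (List Char)),
    rest.length < n →
    (numberSentencesAltGo rest snum parts).flatten = parts.flatten ++ pvRefLit rest snum := by
  intro n
  induction n with
  | zero => intro rest snum parts h; omega
  | succ n ih =>
    intro rest snum parts hlen
    cases rest with
    | nil =>
      rw [numberSentencesAltGo.eq_def]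
      simp [pvRefLit]
    | cons c r =>
      rw [numberSentencesAltGo.eq_def]
      dsimp only
      by_cases hneg : PySem.Chars.find (c :: r) ['<'] = -1
      · have hnin : ∀ x ∈ (c :: r), x ≠ '<' := by
          have h2 := (PySem.Chars.find_eq_neg_one_iff (c :: r) ['<']).mp hneg
          intro x hx hxeq
          exact h2 ((pv_singleton_infix '<' (c :: r)).mpr (hxeq ▸ hx))
        rw [if_pos hneg, pvRefLit_no_lt _ snum hnin]
        simp
      · have h0 : 0 ≤ PySem.Chars.find (c :: r) ['<'] := by
          have := PySem.Chars.neg_one_le_find (c :: r) ['<']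
          omega
        rw [if_neg hneg, PySem.List.slice_to _ h0]
        obtain ⟨hpre, hmin⟩ := PySem.Chars.find_spec h0
        generalize hkk : (PySem.Chars.find (c :: r) ['<']).toNat = k at hpre hmin ⊢
        obtain ⟨tl, htl⟩ := hpre
        have htl2 : tl = List.drop (k + 1) (c :: r) := by
          have htail : (List.drop k (c :: r)).tail = List.drop (k + 1) (c :: r) :=
            List.tail_drop
          rw [← htl] at htail
          simpa using htail
        have hdk : List.drop k (c :: r) = '<' :: List.drop (k + 1) (c :: r) := by
          rw [← htl, htl2]
          rfl
        have hsplit : c :: r = List.take k (c :: r) ++ '<' :: List.drop (k + 1) (c :: r) := by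
          conv_lhs => rw [← List.take_append_drop k (c :: r)]
          rw [hdk]
        have hprenin : ∀ x ∈ List.take k (c :: r), x ≠ '<' := by
          intro x hx hxeq
          subst hxeq
          obtain ⟨i, hi, hix⟩ := List.mem_iff_getElem.mp hx
          have hlt' : i < min k (c :: r).length := by
            have h2 := hi
            rw [List.length_take] at h2
            exact h2
          have hik : i < k := by omega
          have hil : i < (c :: r).length := by omega
          apply hmin i hik
          refine ⟨List.drop (i + 1) (c :: r), ?_⟩
          have hgi : (c :: r)[i]'hil = '<' := by
            rw [← hix]
            simp [List.getElem_take]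
          have hcd : (c :: r)[i]'hil :: List.drop (i + 1) (c :: r) = List.drop i (c :: r) :=
            List.getElem_cons_drop hil
          rw [← hcd, hgi]
          rfl
        have href : pvRefLit (c :: r) snum
            = List.take k (c :: r) ++ pvRefTag (List.drop (k + 1) (c :: r)) ['<'] snum := by
          conv_lhs => rw [hsplit]
          exact pvRefLit_split _ _ snum hprenin
        split
        next heq =>
          rw [href, pvRefTag_consume, heq]
          simp
        next tag rest' heq =>
          have hlt2 : rest'.length < n := by
            have hlc := pvConsumeTag_length _ _ _ _ heq
            simp only [List.length_drop, List.length_cons] at hlc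
            simp only [List.length_cons] at hlen
            omega
          rw [ih _ _ _ hlt2, href, pvRefTag_consume, heq]
          simp [pvProc]

theorem aGo_eq : ∀ (n : Nat) (all rest : List Char) (idx : Nat) (snum : Int)
    (res : List (List Char)) (tagStart : Nat),
    rest.length < n → all.drop idx = rest →
    ((numberSentencesGo all rest idx snum false tagStart res).flatten
        = res.flatten ++ pvRefLit rest snum)
    ∧ (tagStart < idx →
        (numberSentencesGo all rest idx snum true tagStart res).flatten
          = res.flatten ++ pvRefTag rest ((all.drop tagStart).take (idx - tagStart)) snum) := by
  intro n
  induction n with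
  | zero => intro all rest idx snum res t h _; omega
  | succ n ih =>
    intro all rest idx snum res t hlen hdrop
    cases rest with
    | nil =>
      constructor
      · simp [numberSentencesGo, pvRefLit]
      · intro _
        simp [numberSentencesGo, pvRefTag]
    | cons c r =>
      have hlen' : r.length < n := by
        simp only [List.length_cons] at hlen
        omega
      have hdrop' : all.drop (idx + 1) = r := by
        have htail : (List.drop idx all).tail = List.drop (idx + 1) all := List.tail_drop
        rw [hdrop] at htail
        simpa using htail.symm
      have hget : all[idx]? = some c := by
        have hh : (List.drop idx all)[0]? = all[idx + 0]? := List.getElem?_drop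
        rw [hdrop] at hh
        simpa using hh.symm
      have hacc1 : (all.drop idx).take (idx + 1 - idx) = [c] := by
        rw [show idx + 1 - idx = 1 by omega, hdrop]
        simp
      constructor
      · by_cases hc : c = '<'
        · subst hc
          have hbranch : numberSentencesGo all ('<' :: r) idx snum false t res
              = numberSentencesGo all r (idx + 1) snum true idx res := by
            simp [numberSentencesGo]
          rw [hbranch, (ih all r (idx + 1) snum res idx hlen' hdrop').2 (by omega), hacc1]
          simp [pvRefLit]
        · have hbranch : numberSentencesGo all (c :: r) idx snum false t res
              = numberSentencesGo all r (idx + 1) snum false t (res ++ [[c]]) := by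
            simp [numberSentencesGo, hc]
          rw [hbranch, (ih all r (idx + 1) snum (res ++ [[c]]) t hlen' hdrop').1]
          simp [pvRefLit, hc]
      · intro ht
        by_cases hc : c = '<'
        · subst hc
          have hbranch : numberSentencesGo all ('<' :: r) idx snum true t res
              = numberSentencesGo all r (idx + 1) snum true idx res := by
            simp [numberSentencesGo]
          rw [hbranch, (ih all r (idx + 1) snum res idx hlen' hdrop').2 (by omega), hacc1]
          simp [pvRefTag]
        · by_cases hgt : c = '>'
          · subst hgt
            have hslice : PySem.List.slice all (some (t : Int)) (some ((idx : Int) + 1))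
                = (all.drop t).take (idx - t) ++ ['>'] := by
              have hcast : ((idx : Int) + 1) = ((idx + 1 : Nat) : Int) := by push_cast; ring
              rw [hcast, PySem.List.slice_natCast]
              exact pv_take_snoc all t idx '>' (by omega) hget
            have hbranch : numberSentencesGo all ('>' :: r) idx snum true t res
                = numberSentencesGo all r (idx + 1)
                    (pvProc ((all.drop t).take (idx - t) ++ ['>']) snum).2 false t
                    (res ++ [(pvProc ((all.drop t).take (idx - t) ++ ['>']) snum).1]) := by
              rw [show numberSentencesGo all ('>' :: r) idx snum true t res
                  = numberSentencesGo all r (idx + 1)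
                      (pvProc (PySem.List.slice all (some (t : Int)) (some ((idx : Int) + 1))) snum).2 false t
                      (res ++ [(pvProc (PySem.List.slice all (some (t : Int)) (some ((idx : Int) + 1))) snum).1])
                from by simp [numberSentencesGo, pvProc], hslice]
            rw [hbranch, (ih all r (idx + 1) _ _ t hlen' hdrop').1]
            simp [pvRefTag]
          · have hbranch : numberSentencesGo all (c :: r) idx snum true t res
                = numberSentencesGo all r (idx + 1) snum true t res := by
              simp [numberSentencesGo, hc, hgt]
            rw [hbranch, (ih all r (idx + 1) snum res t hlen' hdrop').2 (by omega),
              pv_take_snoc all t idx c (by omega) hget]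
            simp [pvRefTag, hc, hgt]

-- ===== VERDICT (by name: the statement is the Claim_ definition above) =====
theorem number_sentences_spec : Claim_equal_number_sentences := by
  intro data _
  unfold Spec_number_sentences number_sentences number_sentences_alt
  have hA := (aGo_eq (data.toList.length + 1) data.toList data.toList 0 1 [] 0
      (by omega) (by simp)).1
  have hB := altGo_eq (data.toList.length + 1) data.toList 1 [] (by omega)
  rw [hA, hB]
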